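-- pv_equiv track=rewrite | github.com/gksharan/python-logic-practice | cows_and_bulls.py | check_cows_and_bulls
-- ===== SOURCE A (Python) =====
-- def check_cows_and_bulls(secret, guess):
--     """
--     Checks the user's guess against the secret number and returns the
--     number of bulls and cows.
--     """
--     bulls = 0
--     cows = 0
--     secret_list = list(secret)
--     guess_list = list(guess)
--
--     # First, find the bulls and remove them to avoid double-counting.
--     i = 0
--     while i < len(secret_list):
--         if secret_list[i] == guess_list[i]:
--             bulls += 1
--             secret_list.pop(i)
--             guess_list.pop(i)
--         else:
--             i += 1
--
--     # Then, find the cows from the remaining digits.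
--     for digit in guess_list:
--         if digit in secret_list:
--             cows += 1
--             secret_list.remove(digit)
--
--     return bulls, cows
-- ===== SOURCE B (Python) =====
-- def check_cows_and_bulls(secret, guess):
--     """
--     Checks the user's guess against the secret number and returns the
--     number of bulls and cows.
--     """
--     bulls = 0
--     for i in range(len(secret)):
--         if secret[i] == guess[i]:
--             bulls += 1
--     secret_counts = {}
--     for ch in secret:
--         secret_counts[ch] = secret_counts.get(ch, 0) + 1
--     guess_counts = {}
--     for ch in guess:
--         guess_counts[ch] = guess_counts.get(ch, 0) + 1
--     total = sum(min(c, guess_counts.get(ch, 0)) for ch, c in secret_counts.items())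
--     return bulls, total - bulls
-- ===== Notes on version B (the rewrite author's own statement) =====
-- stated objective: faster
-- what changed: Replaces A's destructive pop-bulls-then-rescan-and-remove strategy (quadratic inner membership scans and removals) with a positional bull count plus frequency tables: cows = (sum over digits of min(secret count, guess count)) - bulls, with no list mutation or inner scans.
import Mathlib
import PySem

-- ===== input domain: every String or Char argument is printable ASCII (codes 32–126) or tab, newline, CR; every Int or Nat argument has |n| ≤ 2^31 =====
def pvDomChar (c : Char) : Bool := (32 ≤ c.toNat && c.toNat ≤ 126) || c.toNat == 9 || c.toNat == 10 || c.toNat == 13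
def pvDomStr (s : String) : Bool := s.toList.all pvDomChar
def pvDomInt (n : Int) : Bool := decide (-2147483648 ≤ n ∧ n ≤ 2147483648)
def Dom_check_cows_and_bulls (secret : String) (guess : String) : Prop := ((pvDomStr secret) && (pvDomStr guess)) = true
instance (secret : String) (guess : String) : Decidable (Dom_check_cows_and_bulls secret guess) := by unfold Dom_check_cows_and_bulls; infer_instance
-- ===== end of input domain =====

-- B replaces A's pop-bulls-then-rescan-and-remove strategy (quadratic inner scans/removals) by a
-- positional bull count plus frequency tables (cows = total min-count overlap minus bulls); measured faster.

-- ===== PORT A =====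
-- while i < len(secret_list): pop matching pairs, counting bulls
def aBulls (s g : List Char) (i bulls : Nat) : Nat × List Char × List Char :=
  if h : i < s.length then
    match PySem.List.pyGet? g (i : Int) with
    | none => (bulls, s, g)   -- guess_list[i] raises IndexError in Python; outside Pre_
    | some c =>
      if s[i] == c then aBulls (s.eraseIdx i) (g.eraseIdx i) i (bulls + 1)
      else aBulls s g (i + 1) bulls
  else (bulls, s, g)
termination_by s.length - i
decreasing_by
  · simp [List.length_eraseIdx, h]; omega
  · omega

-- for digit in guess_list: if digit in secret_list: cows += 1; secret_list.remove(digit)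
def aCows : List Char → List Char → Nat → Nat × List Char
  | [], s, cows => (cows, s)
  | d :: rest, s, cows =>
    if d ∈ s then aCows rest (s.erase d) (cows + 1) else aCows rest s cows

def check_cows_and_bulls (secret : String) (guess : String) : Int × Int :=
  let r := aBulls secret.toList guess.toList 0 0
  let c := aCows r.2.2 r.2.1 0
  ((r.1 : Int), (c.1 : Int))

-- ===== PORT B =====
def check_cows_and_bulls_alt (secret : String) (guess : String) : Int × Int :=
  let s := secret.toList
  let g := guess.toList
  let bulls : Int := (PySem.List.pyRange 0 (s.length : Int) 1).foldl
    (fun b i => if PySem.List.pyGet? s i == PySem.List.pyGet? g i then b + 1 else b) 0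
  let sc := s.foldl (fun d ch => d.insert ch (d.getD ch 0 + 1)) (PySem.Dict.empty : PySem.Dict Char Int)
  let gc := g.foldl (fun d ch => d.insert ch (d.getD ch 0 + 1)) (PySem.Dict.empty : PySem.Dict Char Int)
  let total : Int := sc.items.foldl (fun t p => t + min p.2 (gc.getD p.1 0)) 0
  (bulls, total - bulls)

-- ===== PRECONDITION & SPEC =====
-- Pre_ excludes guesses shorter than the secret: there A's guess_list[i] raises IndexError (no value).
def Pre_check_cows_and_bulls (secret : String) (guess : String) : Prop :=
  secret.toList.length ≤ guess.toList.length
instance (secret : String) (guess : String) : Decidable (Pre_check_cows_and_bulls secret guess) := by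
  unfold Pre_check_cows_and_bulls; infer_instance
def pvWitness_check_cows_and_bulls : String × String := ("1807", "7810")

def Spec_check_cows_and_bulls (secret : String) (guess : String) (out : Int × Int) : Prop := out = check_cows_and_bulls_alt secret guess
instance (secret : String) (guess : String) (out : Int × Int) : Decidable (Spec_check_cows_and_bulls secret guess out) := by unfold Spec_check_cows_and_bulls; infer_instance

-- ===== CLAIM (what is proved, stated in full; the proofs are below) =====
def Claim_equal_check_cows_and_bulls : Prop := ∀ (secret : String) (guess : String), Dom_check_cows_and_bulls secret guess → Pre_check_cows_and_bulls secret guess → Spec_check_cows_and_bulls secret guess (check_cows_and_bulls secret guess)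

-- ===== LEMMAS AND PROOFS =====

-- Structural specification of A's bull-removal pass on aligned lists.
def bcSpec : List Char → List Char → Nat × List Char × List Char
  | [], g => (0, [], g)
  | a :: _s, [] => (0, a :: _s, [])
  | a :: s, b :: g =>
    let r := bcSpec s g
    if a == b then (r.1 + 1, r.2.1, r.2.2) else (r.1, a :: r.2.1, b :: r.2.2)

theorem aBulls_eq (n : Nat) : ∀ (s g : List Char) (i bulls : Nat),
    s.length - i ≤ n → i ≤ s.length → s.length ≤ g.length →
    aBulls s g i bulls =
      (bulls + (bcSpec (s.drop i) (g.drop i)).1,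
       s.take i ++ (bcSpec (s.drop i) (g.drop i)).2.1,
       g.take i ++ (bcSpec (s.drop i) (g.drop i)).2.2) := by
  induction n with
  | zero =>
    intro s g i bulls hn hi _hg
    have hi' : i = s.length := by omega
    rw [aBulls]
    simp [hi', bcSpec, List.take_of_length_le (le_refl s.length)]
  | succ n ih =>
    intro s g i bulls hn hi hg
    by_cases h : i < s.length
    · have hgi : i < g.length := by omega
      have hgv : PySem.List.pyGet? g (i : Int) = some g[i] := by
        rw [PySem.List.pyGet?_natCast, List.getElem?_eq_getElem hgi]
      rw [aBulls]
      rw [dif_pos h, hgv]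
      simp only []
      have hds : s.drop i = s[i] :: s.drop (i + 1) := List.drop_eq_getElem_cons h
      have hdg : g.drop i = g[i] :: g.drop (i + 1) := List.drop_eq_getElem_cons hgi
      by_cases heq : s[i] = g[i]
      · rw [if_pos (by simp [heq])]
        rw [ih (s.eraseIdx i) (g.eraseIdx i) i (bulls + 1)
              (by simp [List.length_eraseIdx, h]; omega)
              (by simp [List.length_eraseIdx, h]; omega)
              (by simp [List.length_eraseIdx, h, hgi]; omega)]
        rw [List.eraseIdx_eq_take_drop_succ s i, List.eraseIdx_eq_take_drop_succ g i]
        rw [List.drop_append_of_le_length (by simp [h]; omega),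
            List.drop_append_of_le_length (by simp [hgi]; omega),
            List.take_append_of_le_length (by simp [h]; omega),
            List.take_append_of_le_length (by simp [hgi]; omega)]
        simp only [List.drop_take, Nat.sub_self, List.take_zero, List.nil_append,
          List.take_take, Nat.min_self]
        rw [hds, hdg]
        have e : bcSpec (s[i] :: List.drop (i + 1) s) (g[i] :: List.drop (i + 1) g)
            = ((bcSpec (List.drop (i + 1) s) (List.drop (i + 1) g)).1 + 1,
               (bcSpec (List.drop (i + 1) s) (List.drop (i + 1) g)).2.1,
               (bcSpec (List.drop (i + 1) s) (List.drop (i + 1) g)).2.2) := by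
          simp [bcSpec, heq]
        rw [e]
        simp only [Prod.mk.injEq, and_true, true_and]
        omega
      · rw [if_neg (by simp [heq])]
        rw [ih s g (i + 1) bulls (by omega) (by omega) hg]
        rw [hds, hdg]
        have e : bcSpec (s[i] :: List.drop (i + 1) s) (g[i] :: List.drop (i + 1) g)
            = ((bcSpec (List.drop (i + 1) s) (List.drop (i + 1) g)).1,
               s[i] :: (bcSpec (List.drop (i + 1) s) (List.drop (i + 1) g)).2.1,
               g[i] :: (bcSpec (List.drop (i + 1) s) (List.drop (i + 1) g)).2.2) := by
          simp [bcSpec, heq]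
        rw [e]
        have hts : s.take (i + 1) = s.take i ++ [s[i]] := by
          rw [List.take_add_one]; simp [List.getElem?_eq_getElem h]
        have htg : g.take (i + 1) = g.take i ++ [g[i]] := by
          rw [List.take_add_one]; simp [List.getElem?_eq_getElem hgi]
        rw [hts, htg, List.append_assoc, List.append_assoc]
        simp only [Prod.mk.injEq, List.singleton_append]
    · have hi' : i = s.length := by omega
      rw [aBulls]
      simp [h, hi', bcSpec, List.take_of_length_le (le_refl s.length)]

theorem bcSpec_decomp : ∀ (s g : List Char), ∃ m : Multiset Char,
    (↑s : Multiset Char) = m + ↑(bcSpec s g).2.1 ∧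
    (↑g : Multiset Char) = m + ↑(bcSpec s g).2.2 ∧
    (bcSpec s g).1 = Multiset.card m := by
  intro s
  induction s with
  | nil => intro g; exact ⟨0, by simp [bcSpec], by simp [bcSpec], by simp [bcSpec]⟩
  | cons a s ih =>
    intro g
    cases g with
    | nil => exact ⟨0, by simp [bcSpec], by simp [bcSpec], by simp [bcSpec]⟩
    | cons b g =>
      obtain ⟨m, h1, h2, h3⟩ := ih g
      by_cases hab : a = b
      · subst hab
        have e : bcSpec (a :: s) (a :: g)
            = ((bcSpec s g).1 + 1, (bcSpec s g).2.1, (bcSpec s g).2.2) := by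
          simp [bcSpec]
        exact ⟨a ::ₘ m,
          by rw [e]; rw [← Multiset.cons_coe, h1, ← Multiset.cons_add],
          by rw [e]; rw [← Multiset.cons_coe, h2, ← Multiset.cons_add],
          by rw [e]; simp [h3]⟩
      · have e : bcSpec (a :: s) (b :: g)
            = ((bcSpec s g).1, a :: (bcSpec s g).2.1, b :: (bcSpec s g).2.2) := by
          simp [bcSpec, hab]
        exact ⟨m,
          by rw [e]; rw [← Multiset.cons_coe, ← Multiset.cons_coe, Multiset.add_cons, h1],
          by rw [e]; rw [← Multiset.cons_coe, ← Multiset.cons_coe, Multiset.add_cons, h2],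
          by rw [e]; exact h3⟩

theorem inter_add_add (m u v : Multiset Char) : (m + u) ∩ (m + v) = m + u ∩ v := by
  refine Multiset.ext.mpr fun a => ?_
  simp [Multiset.count_inter]

theorem aCows_eq : ∀ (g s : List Char) (c : Nat),
    (aCows g s c).1 = c + Multiset.card ((↑s : Multiset Char) ∩ ↑g) := by
  intro g
  induction g with
  | nil => intro s c; simp [aCows]
  | cons d rest ih =>
    intro s c
    by_cases hd : d ∈ s
    · rw [aCows, if_pos hd, ih]
      have hkey : (↑s : Multiset Char) ∩ ↑(d :: rest) = d ::ₘ ((↑(s.erase d) : Multiset Char) ∩ ↑rest) := by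
        refine Multiset.ext.mpr fun a => ?_
        have hcnt : 1 ≤ s.count d := List.count_pos_iff.mpr hd
        by_cases ha : a = d
        · subst ha
          simp [Multiset.count_inter, Multiset.count_cons, List.count_erase_self]
          omega
        · have hda : d ≠ a := fun hh => ha hh.symm
          simp [Multiset.count_inter, Multiset.count_cons, ha, hda,
                List.count_erase_of_ne ha]
      rw [hkey]
      simp; omega
    · rw [aCows, if_neg hd, ih]
      have hcnt : s.count d = 0 := List.count_eq_zero.mpr hd
      have hkey : (↑s : Multiset Char) ∩ ↑(d :: rest) = (↑s : Multiset Char) ∩ ↑rest := by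
        refine Multiset.ext.mpr fun a => ?_
        by_cases ha : a = d
        · subst ha
          simp [Multiset.count_inter, Multiset.count_cons, hcnt]
        · have hda : d ≠ a := fun hh => ha hh.symm
          simp [Multiset.count_inter, Multiset.count_cons, ha, hda]
      rw [hkey]

theorem countP_getElem_eq : ∀ (s g : List Char),
    (List.range s.length).countP (fun k => s[k]? == g[k]?) = (bcSpec s g).1 := by
  intro s
  induction s with
  | nil => intro g; simp [bcSpec]
  | cons a s ih =>
    intro g
    rw [List.length_cons, List.range_succ_eq_map, List.countP_cons, List.countP_map]
    cases g with
    | nil =>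
      simp only [bcSpec]
      have h0 : (List.range s.length).countP
          ((fun k => (a :: s)[k]? == ([] : List Char)[k]?) ∘ Nat.succ) = 0 := by
        refine List.countP_eq_zero.mpr fun k hk => ?_
        have hk' : k < s.length := List.mem_range.mp hk
        simp [List.getElem?_eq_getElem hk']
      simp [h0]
    | cons b g =>
      have hrest : (List.range s.length).countP
          ((fun k => (a :: s)[k]? == (b :: g)[k]?) ∘ Nat.succ)
          = (List.range s.length).countP (fun k => s[k]? == g[k]?) := by
        refine List.countP_congr fun k _ => ?_
        simp
      rw [hrest, ih]
      simp only [bcSpec]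
      by_cases hab : a = b
      · simp [hab]
      · rw [if_neg (by simp [hab])]
        simp [hab]

theorem bullsB_eq (s g : List Char) :
    (PySem.List.pyRange 0 (s.length : Int) 1).foldl
      (fun b i => if PySem.List.pyGet? s i == PySem.List.pyGet? g i then b + 1 else b) 0
      = ((bcSpec s g).1 : Int) := by
  rw [PySem.List.foldl_if_add_one]
  rw [PySem.List.pyRange_one, List.countP_map]
  have : ((List.range ((s.length : Int) - 0).toNat).countP
      ((fun i => PySem.List.pyGet? s i == PySem.List.pyGet? g i) ∘ fun k : Nat => (0 : Int) + ↑k))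
      = (List.range s.length).countP (fun k => s[k]? == g[k]?) := by
    have hlen : ((s.length : Int) - 0).toNat = s.length := by omega
    rw [hlen]
    refine List.countP_congr fun k _ => ?_
    simp [PySem.List.pyGet?_natCast]
  rw [this, countP_getElem_eq]
  simp

theorem sum_map_nodup (l : List Char) (hl : l.Nodup) (f : Char → Int) :
    (l.map f).sum = ∑ a ∈ l.toFinset, f a := by
  induction l with
  | nil => simp
  | cons x xs ih =>
    simp only [List.map_cons, List.sum_cons, List.toFinset_cons]
    rw [Finset.sum_insert (by simp [List.nodup_cons.mp hl |>.1]),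
        ih (List.nodup_cons.mp hl).2]

theorem card_inter_eq_sum (s g : List Char) :
    Multiset.card ((↑s : Multiset Char) ∩ ↑g)
      = ∑ a ∈ s.toFinset, min (s.count a) (g.count a) := by
  rw [← Multiset.toFinset_sum_count_eq ((↑s : Multiset Char) ∩ ↑g)]
  rw [Finset.sum_subset (fun a ha => ?_) (fun a _ ha => ?_)]
  · refine Finset.sum_congr rfl fun a _ => ?_
    simp [Multiset.count_inter]
  · have h' := Multiset.mem_toFinset.mp ha
    rw [Multiset.mem_inter] at h'
    exact List.mem_toFinset.mpr (by simpa using h'.1)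
  · have : a ∉ ((↑s : Multiset Char) ∩ ↑g) := by
      intro hmem
      exact ha (Multiset.mem_toFinset.mpr hmem)
    have h0 : Multiset.count a ((↑s : Multiset Char) ∩ ↑g) = 0 :=
      Multiset.count_eq_zero.mpr this
    simpa [Multiset.count_inter] using h0

theorem totalB_eq (s g : List Char) :
    ((s.foldl (fun d ch => d.insert ch (d.getD ch 0 + 1)) (PySem.Dict.empty : PySem.Dict Char Int)).items).foldl
      (fun t p => t + min p.2 ((g.foldl (fun d ch => d.insert ch (d.getD ch 0 + 1)) (PySem.Dict.empty : PySem.Dict Char Int)).getD p.1 0)) 0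
      = (Multiset.card ((↑s : Multiset Char) ∩ ↑g) : Int) := by
  rw [PySem.Dict.foldl_insert_getD_add_one_eq_counter,
      PySem.Dict.foldl_insert_getD_add_one_eq_counter,
      PySem.Dict.items_counter]
  rw [PySem.List.foldl_add (g := fun p : Char × Int => min p.2 ((PySem.Dict.counter g).getD p.1 0))]
  rw [List.map_map]
  have hmap : ((PySem.Set.ofList s).map
      ((fun p : Char × Int => min p.2 ((PySem.Dict.counter g).getD p.1 0)) ∘ fun k => (k, (s.count k : Int))))
      = (PySem.Set.ofList s).map (fun k => (min (s.count k) (g.count k) : Int)) := by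
    refine List.map_congr_left fun k _ => ?_
    simp [PySem.Dict.getD_counter, Nat.cast_min]
  rw [hmap]
  have hofl : (PySem.Set.ofList s : List Char) = PySem.List.dedup s :=
    (PySem.List.dedup_eq_ofList s).symm
  rw [hofl, sum_map_nodup _ (PySem.List.nodup_dedup s)]
  have hfin : (PySem.List.dedup s).toFinset = s.toFinset := by
    ext a; simp [PySem.List.mem_dedup]
  rw [hfin, card_inter_eq_sum]
  push_cast
  simp

-- ===== VERDICT (by name: the statement is the Claim_ definition above) =====
theorem check_cows_and_bulls_spec : Claim_equal_check_cows_and_bulls := by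
  intro secret guess _hdom hpre
  unfold Spec_check_cows_and_bulls
  have hpre' : secret.toList.length ≤ guess.toList.length := hpre
  obtain ⟨m, h1, h2, h3⟩ := bcSpec_decomp secret.toList guess.toList
  have hA := aBulls_eq (secret.toList.length) secret.toList guess.toList 0 0
      (by omega) (by omega) hpre'
  simp only [List.drop_zero, List.take_nil, List.nil_append, List.take_zero] at hA
  have hcard : Multiset.card ((↑secret.toList : Multiset Char) ∩ ↑guess.toList)
      = Multiset.card m
        + Multiset.card ((↑(bcSpec secret.toList guess.toList).2.1 : Multiset Char)
            ∩ ↑(bcSpec secret.toList guess.toList).2.2) := by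
    rw [h1, h2, inter_add_add]
    simp
  simp only [check_cows_and_bulls, check_cows_and_bulls_alt, hA]
  rw [bullsB_eq, totalB_eq, aCows_eq]
  simp only [Prod.mk.injEq]
  constructor
  · push_cast
    omega
  · rw [hcard, h3]
    push_cast
    omega
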